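-- pv_equiv track=rewrite | github.com/piotreuszxx/TimetableOptimizer | DataSet.py | Count_bloki
-- ===== SOURCE A (Python) =====
-- def Count_bloki(dzien):  # zlicza bloki lekcyjne podanego dnia
--     bloki = 0
--     is_in_blok = False  # True jeżeli lekcja jest w srodku bloku
--     for lekcja in range(len(dzien)):
--         if dzien[lekcja][0] != -1 and is_in_blok == False:
--             bloki += 1
--             is_in_blok = True
--
--         elif dzien[lekcja][0] == -1 and is_in_blok == True:  # czy koniec bloku zajec
--             is_in_blok = False
--
--     return bloki
-- ===== SOURCE B (Python) =====
-- def Count_bloki(dzien):  # zlicza bloki lekcyjne podanego dnia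
--     # connected-components identity on a path graph: each block of k consecutive
--     # non-empty lessons contributes k lessons and k-1 adjacent non-empty pairs,
--     # so  #blocks = #non-empty lessons - #adjacent non-empty pairs.
--     nonempty = sum(1 for lekcja in dzien if lekcja[0] != -1)
--     adjacent = sum(1 for a, b in zip(dzien, dzien[1:]) if a[0] != -1 and b[0] != -1)
--     return nonempty - adjacent
-- ===== Notes on version B (the rewrite author's own statement) =====
-- stated objective: alternative
-- what changed: Replaces the in-block flag state machine with the connected-components identity: blocks = (# non-empty lessons) - (# adjacent non-empty pairs), computed as two independent counts and a subtraction.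
import Mathlib
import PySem

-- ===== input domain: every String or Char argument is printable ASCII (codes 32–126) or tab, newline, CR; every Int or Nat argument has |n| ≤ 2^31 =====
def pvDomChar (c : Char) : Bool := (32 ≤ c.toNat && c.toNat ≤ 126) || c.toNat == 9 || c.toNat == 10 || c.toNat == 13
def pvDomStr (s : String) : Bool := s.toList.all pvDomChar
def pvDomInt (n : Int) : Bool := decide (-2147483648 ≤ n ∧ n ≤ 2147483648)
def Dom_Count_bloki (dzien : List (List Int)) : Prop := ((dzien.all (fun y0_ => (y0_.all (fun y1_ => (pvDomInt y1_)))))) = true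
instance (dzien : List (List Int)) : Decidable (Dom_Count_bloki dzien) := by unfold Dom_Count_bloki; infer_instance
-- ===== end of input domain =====

-- B drops A's in-block flag machine and uses the components identity
-- blocks = (# non-empty lessons) - (# adjacent non-empty pairs); same O(n) cost.

-- ===== PORT A =====
-- loop body; `dzien[lekcja][0]` is PySem.List.pyGet? l 0 (none = IndexError, excluded
-- by Pre_; the .getD 0 default is never reached inside Pre_)
def pvStepA (st : Int × Bool) (lekcja : List Int) : Int × Bool :=
  let v := (PySem.List.pyGet? lekcja 0).getD 0
  if v ≠ -1 ∧ st.2 = false then (st.1 + 1, true)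
  else if v = -1 ∧ st.2 = true then (st.1, false)
  else st

def Count_bloki (dzien : List (List Int)) : Int :=
  (dzien.foldl pvStepA (0, false)).1

-- ===== PORT B =====
-- lekcja[0] != -1 (IndexError on an empty lesson excluded by Pre_)
def pvKey (lekcja : List Int) : Bool := ((PySem.List.pyGet? lekcja 0).getD 0) ≠ -1

def Count_bloki_alt (dzien : List (List Int)) : Int :=
  let nonempty : Int :=
    (dzien.map (fun lekcja => if pvKey lekcja then (1 : Int) else 0)).sum
  let adjacent : Int :=
    ((dzien.zip (PySem.List.slice dzien (some 1) none)).map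
      (fun p => if pvKey p.1 ∧ pvKey p.2 then (1 : Int) else 0)).sum
  nonempty - adjacent

-- ===== PRECONDITION & SPEC =====
-- Pre_: every lesson is a non-empty list; on an empty lesson both Pythons raise IndexError at lekcja[0].
def Pre_Count_bloki (dzien : List (List Int)) : Prop := ∀ l ∈ dzien, l ≠ []
instance (dzien : List (List Int)) : Decidable (Pre_Count_bloki dzien) := by unfold Pre_Count_bloki; infer_instance

def pvWitness_Count_bloki : List (List Int) := [[1], [-1], [3]]

def Spec_Count_bloki (dzien : List (List Int)) (out : Int) : Prop := out = Count_bloki_alt dzien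
instance (dzien : List (List Int)) (out : Int) : Decidable (Spec_Count_bloki dzien out) := by unfold Spec_Count_bloki; infer_instance

-- ===== CLAIM =====
def Claim_equal_Count_bloki : Prop := ∀ (dzien : List (List Int)), Dom_Count_bloki dzien → Pre_Count_bloki dzien → Spec_Count_bloki dzien (Count_bloki dzien)

-- ===== LEMMAS AND PROOFS =====

-- counts over Bool keys
def pvCnt (ks : List Bool) : Int := (ks.map (fun k => if k then (1 : Int) else 0)).sum
def pvAdj (ks : List Bool) : Int :=
  ((ks.zip (ks.drop 1)).map (fun p => if p.1 ∧ p.2 then (1 : Int) else 0)).sum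

-- A's step leaves the flag equal to the current lesson's key and adds one exactly on a run start.
theorem pvStepA_eq (st : Int × Bool) (l : List Int) :
    pvStepA st l = (st.1 + (if pvKey l = true ∧ st.2 = false then 1 else 0), pvKey l) := by
  rcases st with ⟨c, b⟩
  simp only [pvStepA, pvKey]
  rcases eq_or_ne ((PySem.List.pyGet? l 0).getD 0) (-1) with h | h <;> cases b <;> simp [h]

-- A's flag fold over the keys = count of true keys minus count of adjacent true pairs (previous key prepended).
theorem pv_fold_keys (ks : List Bool) :
    ∀ (c : Int) (b : Bool),
      (ks.foldl (fun st k => (st.1 + (if k = true ∧ st.2 = false then 1 else 0), k)) (c, b)).1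
        = c + pvCnt ks - pvAdj (b :: ks) := by
  induction ks with
  | nil => intro c b; simp [pvCnt, pvAdj]
  | cons k rest ih =>
      intro c b
      simp only [List.foldl_cons]
      rw [ih]
      cases k <;> cases b <;>
        simp [pvCnt, pvAdj, List.zip_cons_cons] <;> ring

-- prepending a false previous key adds no adjacent pair
theorem pvAdj_false_cons (ks : List Bool) : pvAdj (false :: ks) = pvAdj ks := by
  cases ks <;> simp [pvAdj]

-- B's expression over the day equals the key-level counts
theorem pv_alt_eq (dzien : List (List Int)) :
    Count_bloki_alt dzien = pvCnt (dzien.map pvKey) - pvAdj (dzien.map pvKey) := by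
  simp [Count_bloki_alt, pvCnt, pvAdj, PySem.List.slice_from_one, List.drop_one,
    ← List.map_tail, List.zip_map, List.map_map, Function.comp_def, Prod.map_def]

-- ===== VERDICT =====
theorem Count_bloki_spec : Claim_equal_Count_bloki := by
  intro dzien _ _
  show Count_bloki dzien = Count_bloki_alt dzien
  have hA : Count_bloki dzien
      = ((dzien.map pvKey).foldl
          (fun st k => (st.1 + (if k = true ∧ st.2 = false then 1 else 0), k)) ((0 : Int), false)).1 := by
    have hf : pvStepA = fun (st : Int × Bool) (l : List Int) =>
        (st.1 + (if pvKey l = true ∧ st.2 = false then (1 : Int) else 0), pvKey l) := by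
      funext st l; exact pvStepA_eq st l
    rw [List.foldl_map]
    unfold Count_bloki
    rw [hf]
  rw [hA, pv_fold_keys, pvAdj_false_cons, pv_alt_eq]
  ring
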